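-- pv_equiv track=rewrite | github.com/glukhodednastya/aaa-algorithms | trees/main.py | get_level_order_keys_and_levels
-- ===== SOURCE A (Python) =====
-- import queue
--
-- class TreeNode:
--     def __init__(self, key: int, level=0):
--         self.key = key
--         self.left = None
--         self.right = None
--         self.level = level
--
-- def get_pre_index():
--     return build_tree.pre_index
--
-- def increment_pre_index():
--     build_tree.pre_index += 1
--
-- def build_tree(pre: list, index: int, low: int, high: int):
--     if low > high:
--         return None
--
--     root = TreeNode(key=pre[get_pre_index()], level=index)
--     increment_pre_index()
--
--     if low == high:
--         return root
--
--     r_child_index = -1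
--     for i in range(low, high + 1):
--         if pre[i] > root.key:
--             r_child_index = i
--             break
--
--     if r_child_index == -1:
--         r_child_index = get_pre_index() + (high - low)
--     root.left = build_tree(pre, index + 1, get_pre_index(), r_child_index - 1)
--     root.right = build_tree(pre, index + 1, r_child_index, high)
--
--     return root
--
-- def get_level_order_keys_and_levels(preorder_keys: list):
--     build_tree.pre_index = 0
--     root = build_tree(preorder_keys, 0, 0, len(preorder_keys) - 1)
--
--     keys = list()
--     levels = list()
--     q = queue.Queue()
--
--     q.put(root)
--     while not q.empty():
--         current = q.get()
--         keys.append(current.key)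
--         levels.append(current.level)
--         if current.left is not None:
--             q.put(current.left)
--         if current.right is not None:
--             q.put(current.right)
--
--     return keys, levels
-- ===== SOURCE B (Python) =====
-- def get_level_order_keys_and_levels(preorder_keys: list):
--     # O(n) build: consume the preorder once, recursing with an upper bound;
--     # then collect keys/levels level by level (no per-node queue operations).
--     n = len(preorder_keys)
--     idx = 0
--
--     def build(bound, level):
--         nonlocal idx
--         if idx == n:
--             return None
--         key = preorder_keys[idx]
--         if bound is not None and key > bound:
--             return None
--         idx += 1
--         left = build(key, level + 1)
--         right = build(bound, level + 1)
--         return (key, level, left, right)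
--
--     root = build(None, 0)
--
--     keys = []
--     levels = []
--     cur = [root] if root is not None else []
--     while cur:
--         nxt = []
--         for key, level, left, right in cur:
--             keys.append(key)
--             levels.append(level)
--             if left is not None:
--                 nxt.append(left)
--             if right is not None:
--                 nxt.append(right)
--         cur = nxt
--     return keys, levels
-- ===== Notes on version B (the rewrite author's own statement) =====
-- stated objective: faster
-- what changed: B builds the BST in one left-to-right pass over the preorder using an upper-bound-limited recursion (no per-node scan for the first greater element) and emits keys/levels level by level instead of a one-node-at-a-time queue; on the empty list, where A raises AttributeError (excluded by Pre_), B returns ([], []).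
import Mathlib
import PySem

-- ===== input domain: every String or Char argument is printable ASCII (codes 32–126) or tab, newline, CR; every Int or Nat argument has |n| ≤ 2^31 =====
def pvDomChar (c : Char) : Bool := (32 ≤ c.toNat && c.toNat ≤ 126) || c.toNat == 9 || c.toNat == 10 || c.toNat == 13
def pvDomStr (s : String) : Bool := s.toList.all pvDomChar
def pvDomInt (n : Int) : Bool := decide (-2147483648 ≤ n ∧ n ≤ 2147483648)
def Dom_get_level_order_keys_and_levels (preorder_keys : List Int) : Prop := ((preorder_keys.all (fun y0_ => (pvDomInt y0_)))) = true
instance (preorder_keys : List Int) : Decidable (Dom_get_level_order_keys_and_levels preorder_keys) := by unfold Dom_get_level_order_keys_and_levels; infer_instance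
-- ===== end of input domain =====

-- B replaces A's quadratic build (a scan for the first greater key at every node) by a single
-- left-to-right pass with an upper bound, and the one-node-at-a-time queue by a level-by-level sweep.
-- A raises AttributeError on the empty list (it enqueues the None root and reads .key); B returns ([], []).

-- Binary tree with key and level stored in each node (Python TreeNode / B's tuples; nil = None).
inductive PvTree : Type
  | nil : PvTree
  | node : Int → Int → PvTree → PvTree → PvTree
deriving DecidableEq, Repr

def pvChildren : PvTree → List PvTree
  | .nil => []
  | .node _ _ l r => (if l ≠ .nil then [l] else []) ++ (if r ≠ .nil then [r] else [])

def pvSize : PvTree → Nat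
  | .nil => 0
  | .node _ _ l r => 1 + pvSize l + pvSize r

-- ===== PORT A =====

-- 'for i in range(low, high+1): if pre[i] > root.key: r_child_index = i; break' (over the range list)
def pvScanA (pre : List Int) (key : Int) : List Int → Int
  | [] => -1
  | i :: rest => if (PySem.List.pyGet? pre i).getD 0 > key then i else pvScanA pre key rest

-- build_tree(pre, index, low, high) with the mutable build_tree.pre_index threaded through;
-- fuel only makes the recursion total (any fuel > high+1-low suffices, proved in the lemmas below).
-- pre[pre_index] is read with .getD 0: on every state reached from a nonempty input the index is
-- in range (established by the proof), so this is exact there.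
def pvBuildA (pre : List Int) : Nat → Int → Int → Int → Int → PvTree × Int
  | 0, _, _, _, preIdx => (.nil, preIdx)
  | fuel + 1, index, low, high, preIdx =>
    if low > high then (.nil, preIdx)
    else
      let key := (PySem.List.pyGet? pre preIdx).getD 0
      let preIdx1 := preIdx + 1
      if low == high then (.node key index .nil .nil, preIdx1)
      else
        let r0 := pvScanA pre key (PySem.List.pyRange low (high + 1) 1)
        let r := if r0 == -1 then preIdx1 + (high - low) else r0
        let res1 := pvBuildA pre fuel (index + 1) preIdx1 (r - 1) preIdx1
        let res2 := pvBuildA pre fuel (index + 1) r high res1.2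
        (.node key index res1.1 res2.1, res2.2)

-- the queue.Queue BFS loop; the queue only ever holds real nodes (children are pushed only when
-- not None), so the .nil case below is unreachable from the entry point.
def pvBfsA (q : List PvTree) : List Int × List Int :=
  match q with
  | [] => ([], [])
  | .nil :: _ => ([], [])
  | .node k lv l r :: rest =>
    let out := pvBfsA (rest ++ pvChildren (.node k lv l r))
    (k :: out.1, lv :: out.2)
termination_by ((q.map pvSize).sum, q.length)
decreasing_by
  simp only [List.map_append, List.sum_append, pvChildren]
  rcases l with _ | ⟨lk, ll, la, lb⟩ <;> rcases r with _ | ⟨rk, rl, ra, rb⟩ <;>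
    simp [pvSize] <;> omega

def get_level_order_keys_and_levels (preorder_keys : List Int) : List Int × List Int :=
  let root := (pvBuildA preorder_keys (preorder_keys.length + 1) 0 0 ((preorder_keys.length : Int) - 1) 0).1
  match root with
  | .nil => ([], [])   -- Python raises AttributeError here (only the empty input); excluded by Pre_
  | t => pvBfsA [t]

-- ===== PORT B =====

-- build(bound, level) from Source B, with the nonlocal idx threaded; bound none = no bound.
-- Same fuel remark as for pvBuildA (any fuel > n - idx suffices); same .getD 0 remark.
def pvBuildB (pre : List Int) (n : Int) : Nat → Option Int → Int → Int → PvTree × Int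
  | 0, _, _, idx => (.nil, idx)
  | fuel + 1, bound, level, idx =>
    if idx == n then (.nil, idx)
    else
      let key := (PySem.List.pyGet? pre idx).getD 0
      if (match bound with | some b => decide (key > b) | none => false) then (.nil, idx)
      else
        let res1 := pvBuildB pre n fuel (some key) (level + 1) (idx + 1)
        let res2 := pvBuildB pre n fuel bound (level + 1) res1.2
        (.node key level res1.1 res2.1, res2.2)

def pvSizeB : PvTree → Nat
  | .nil => 0
  | .node _ _ l r => pvSizeB l + pvSizeB r + 1

-- 'for key, level, left, right in cur: …' — one level's keys, levels, and the next level's nodes.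
-- cur never contains None (children are appended only when not None), so the .nil case is unreachable.
def pvLevelStep : List PvTree → List Int × List Int × List PvTree
  | .node k lv l r :: rest =>
    let out := pvLevelStep rest
    (k :: out.1, lv :: out.2.1,
     ((match l with | PvTree.node a b c d => [PvTree.node a b c d] | PvTree.nil => []) ++
      (match r with | PvTree.node a b c d => [PvTree.node a b c d] | PvTree.nil => [])) ++ out.2.2)
  | .nil :: _ => ([], [], [])
  | [] => ([], [], [])

-- helper fact the 'while cur:' loop needs for termination (cited by decreasing_by below)
theorem pvLevelStep_next (cur : List PvTree) :
    (pvLevelStep cur).2.2 = [] ∨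
    ((pvLevelStep cur).2.2.map pvSizeB).sum < (cur.map pvSizeB).sum := by
  induction cur with
  | nil => left; rfl
  | cons t rest ih =>
    rcases t with _ | ⟨k, lv, l, r⟩
    · left; rfl
    · right
      have hle : ((((match l with | PvTree.node a b c d => [PvTree.node a b c d] | PvTree.nil => []) ++
          (match r with | PvTree.node a b c d => [PvTree.node a b c d] | PvTree.nil => [])) : List PvTree).map pvSizeB).sum ≤
          pvSizeB l + pvSizeB r := by
        rcases l with _ | ⟨lk, ll, la, lb⟩ <;> rcases r with _ | ⟨rk, rl, ra, rb⟩ <;> simp [pvSizeB]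
      rcases ih with h | h <;>
        simp only [pvLevelStep, List.map_cons, List.sum_cons, List.map_append, List.sum_append,
          pvSizeB, h] <;> simp_all <;> omega

-- the 'while cur:' loop of Source B
def pvLevB (cur : List PvTree) : List Int × List Int :=
  match cur with
  | [] => ([], [])
  | t :: rest =>
    let step := pvLevelStep (t :: rest)
    let out := pvLevB step.2.2
    (step.1 ++ out.1, step.2.1 ++ out.2)
termination_by ((cur.map pvSizeB).sum, cur.length)
decreasing_by
  rw [Prod.lex_iff]
  rcases pvLevelStep_next (t :: rest) with h | h
  · rw [h]; simp; omega
  · left; exact h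

def get_level_order_keys_and_levels_alt (preorder_keys : List Int) : List Int × List Int :=
  let root := (pvBuildB preorder_keys preorder_keys.length (preorder_keys.length + 1) none 0 0).1
  match root with
  | .node k lv l r => pvLevB [PvTree.node k lv l r]
  | .nil => ([], [])     -- 'cur = [root] if root is not None else []' with empty cur: loop not entered

-- ===== PRECONDITION & SPEC =====
-- Pre_ excludes exactly the empty list, on which A raises AttributeError (None root in the queue).
def Pre_get_level_order_keys_and_levels (preorder_keys : List Int) : Prop := preorder_keys ≠ []
instance (preorder_keys : List Int) : Decidable (Pre_get_level_order_keys_and_levels preorder_keys) := by unfold Pre_get_level_order_keys_and_levels; infer_instance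
def pvWitness_get_level_order_keys_and_levels : List Int := [3, 1, 2, 5, 4]

def Spec_get_level_order_keys_and_levels (preorder_keys : List Int) (out : List Int × List Int) : Prop := out = get_level_order_keys_and_levels_alt preorder_keys
instance (preorder_keys : List Int) (out : List Int × List Int) : Decidable (Spec_get_level_order_keys_and_levels preorder_keys out) := by unfold Spec_get_level_order_keys_and_levels; infer_instance

-- ===== CLAIM (what is proved, stated in full; the proofs are below) =====
def Claim_equal_get_level_order_keys_and_levels : Prop := ∀ (preorder_keys : List Int), Dom_get_level_order_keys_and_levels preorder_keys → Pre_get_level_order_keys_and_levels preorder_keys → Spec_get_level_order_keys_and_levels preorder_keys (get_level_order_keys_and_levels preorder_keys)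

-- ===== LEMMAS AND PROOFS =====

-- split a list at the first element strictly greater than key
def pvSplitGr (key : Int) : List Int → List Int × List Int
  | [] => ([], [])
  | y :: ys => if key < y then ([], y :: ys)
               else (y :: (pvSplitGr key ys).1, (pvSplitGr key ys).2)

theorem pvSplitGr_append (key : Int) (l : List Int) :
    (pvSplitGr key l).1 ++ (pvSplitGr key l).2 = l := by
  induction l with
  | nil => rfl
  | cons y ys ih => by_cases h : key < y <;> simp [pvSplitGr, h, ih]

theorem pvSplitGr_lens (key : Int) (l : List Int) :
    (pvSplitGr key l).1.length + (pvSplitGr key l).2.length = l.length := by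
  have h := congrArg List.length (pvSplitGr_append key l)
  simpa using h

-- the common functional tree both builds produce: root, then the prefix up to the
-- first strictly greater key on the left, the remainder on the right
def pvSpecTree : Int → List Int → PvTree
  | _, [] => .nil
  | d, x :: rest =>
    .node x d (pvSpecTree (d + 1) (pvSplitGr x rest).1)
              (pvSpecTree (d + 1) (pvSplitGr x rest).2)
termination_by _ l => l.length
decreasing_by
  · have h := pvSplitGr_lens x rest; simp; omega
  · have h := pvSplitGr_lens x rest; simp; omega

theorem pvSplitGr_nest1 (key b : Int) (hkb : key ≤ b) (l : List Int) :
    (pvSplitGr key (pvSplitGr b l).1).1 = (pvSplitGr key l).1 := by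
  induction l with
  | nil => rfl
  | cons y ys ih =>
    by_cases h1 : b < y
    · have h2 : key < y := lt_of_le_of_lt hkb h1
      simp [pvSplitGr, h1, h2]
    · by_cases h2 : key < y <;> simp [pvSplitGr, h1, h2, ih]

theorem pvSplitGr_nest2 (key b : Int) (hkb : key ≤ b) (l : List Int) :
    (pvSplitGr key (pvSplitGr b l).1).2 = (pvSplitGr b (pvSplitGr key l).2).1 := by
  induction l with
  | nil => rfl
  | cons y ys ih =>
    by_cases h1 : b < y
    · have h2 : key < y := lt_of_le_of_lt hkb h1
      simp [pvSplitGr, h1, h2]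
    · by_cases h2 : key < y <;> simp [pvSplitGr, h1, h2, ih]

theorem pvSplitGr_nest3 (key b : Int) (hkb : key ≤ b) (l : List Int) :
    (pvSplitGr b l).1 = (pvSplitGr key l).1 ++ (pvSplitGr b (pvSplitGr key l).2).1 := by
  induction l with
  | nil => rfl
  | cons y ys ih =>
    by_cases h1 : b < y
    · have h2 : key < y := lt_of_le_of_lt hkb h1
      simp [pvSplitGr, h1, h2]
    · by_cases h2 : key < y <;> simp [pvSplitGr, h1, h2, ih]

-- the slice pre[low .. high] as a list
def pvSeg (pre : List Int) (low high : Int) : List Int :=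
  (pre.drop low.toNat).take (high + 1 - low).toNat

theorem pvSeg_nil (pre : List Int) (low high : Int) (h : high < low) :
    pvSeg pre low high = [] := by
  unfold pvSeg
  have h0 : (high + 1 - low).toNat = 0 := by omega
  simp [h0]

theorem pvSeg_cons (pre : List Int) (low high : Int) (hl : 0 ≤ low) (hlh : low ≤ high)
    (hh : high < (pre.length : Int)) (hlt : low.toNat < pre.length) :
    pvSeg pre low high = pre[low.toNat] :: pvSeg pre (low + 1) high := by
  unfold pvSeg
  rw [List.drop_eq_getElem_cons hlt]
  have h1 : (high + 1 - low).toNat = (high + 1 - (low + 1)).toNat + 1 := by omega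
  have h2 : (low + 1).toNat = low.toNat + 1 := by omega
  rw [h1, h2, List.take_succ_cons]

theorem pvSeg_length (pre : List Int) (low high : Int) (hl : 0 ≤ low) (hlh : low ≤ high + 1)
    (hh : high + 1 ≤ (pre.length : Int)) :
    (pvSeg pre low high).length = (high + 1 - low).toNat := by
  unfold pvSeg
  simp
  omega

-- the scan 'first i in [i0, high] with pre[i] > key' against pvSplitGr of the slice
theorem pvScanA_spec (pre : List Int) (key : Int) :
    ∀ (k : Nat) (i high : Int), (high + 1 - i).toNat = k → 0 ≤ i → i ≤ high + 1 →
    high + 1 ≤ (pre.length : Int) →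
    pvScanA pre key (PySem.List.pyRange i (high + 1) 1) =
      (if (pvSplitGr key (pvSeg pre i high)).2 = [] then -1
       else i + ((pvSplitGr key (pvSeg pre i high)).1).length) := by
  intro k
  induction k with
  | zero =>
    intro i high hk hi hih hlen
    have hie : high + 1 ≤ i := by omega
    rw [PySem.List.pyRange_one_eq_nil hie, pvSeg_nil pre i high (by omega)]
    simp [pvScanA, pvSplitGr]
  | succ k ih =>
    intro i high hk hi hih hlen
    have hih' : i ≤ high := by omega
    have hlt : i.toNat < pre.length := by omega
    rw [PySem.List.pyRange_one_cons (by omega : i < high + 1)]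
    have hget : (PySem.List.pyGet? pre i).getD 0 = pre[i.toNat] := by
      rw [PySem.List.pyGet?_eq_some_getElem pre hi (by omega)]
      rfl
    rw [pvSeg_cons pre i high hi hih' (by omega) hlt]
    by_cases hgt : key < pre[i.toNat]
    · simp [pvScanA, hget, hgt, pvSplitGr]
    · have hrec := ih (i + 1) high (by omega) (by omega) (by omega) hlen
      simp only [pvScanA, hget, gt_iff_lt]
      rw [if_neg hgt, hrec]
      by_cases hemp : (pvSplitGr key (pvSeg pre (i + 1) high)).2 = []
      · simp [pvSplitGr, hgt, hemp]
      · simp [pvSplitGr, hgt, hemp]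
        omega

-- A's build = pvSpecTree of the slice, returning pre_index = high+1
theorem pvBuildA_spec :
    ∀ (fuel : Nat) (pre : List Int) (d low high : Int),
    0 ≤ low → low ≤ high + 1 → high + 1 ≤ (pre.length : Int) →
    (high + 1 - low).toNat < fuel →
    pvBuildA pre fuel d low high low = (pvSpecTree d (pvSeg pre low high), high + 1) := by
  intro fuel
  induction fuel with
  | zero => intro pre d low high _ _ _ hf; omega
  | succ f ih =>
    intro pre d low high hl hlh hh hf
    by_cases hgt : low > high
    · have hle : low = high + 1 := by omega
      rw [pvSeg_nil pre low high (by omega)]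
      simp [pvBuildA, pvSpecTree, hle]
    · have hlh' : low ≤ high := by omega
      have hlt : low.toNat < pre.length := by omega
      have hget : (PySem.List.pyGet? pre low).getD 0 = pre[low.toNat] := by
        rw [PySem.List.pyGet?_eq_some_getElem pre hl (by omega)]
        rfl
      set y := pre[low.toNat] with hy
      have hseg : pvSeg pre low high = y :: pvSeg pre (low + 1) high :=
        pvSeg_cons pre low high hl hlh' (by omega) hlt
      set rest := pvSeg pre (low + 1) high with hrest
      have hrlen : rest.length = (high - low).toNat := by
        rw [hrest]; rw [pvSeg_length pre (low + 1) high (by omega) (by omega) hh]; omega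
      by_cases heq : low = high
      · subst heq
        have hrnil : rest = [] := by rw [hrest]; exact pvSeg_nil pre (low + 1) low (by omega)
        rw [show pvBuildA pre (f + 1) d low low low =
              (.node ((PySem.List.pyGet? pre low).getD 0) d .nil .nil, low + 1) by
            simp [pvBuildA]]
        rw [hget, hseg, hrnil]
        simp [pvSpecTree, pvSplitGr]
      · have hlth : low < high := by omega
        -- the scan
        have hscan0 : pvScanA pre y (PySem.List.pyRange low (high + 1) 1) =
            pvScanA pre y (PySem.List.pyRange (low + 1) (high + 1) 1) := by
          rw [PySem.List.pyRange_one_cons (by omega : low < high + 1)]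
          simp [pvScanA, hget]
        have hscan := pvScanA_spec pre y ((high + 1 - (low + 1)).toNat) (low + 1) high rfl
          (by omega) (by omega) hh
        set len1 := ((pvSplitGr y rest).1).length with hlen1
        have hlens := pvSplitGr_lens y rest
        have hlen1le : len1 ≤ (high - low).toNat := by omega
        have hr : (if (pvScanA pre y (PySem.List.pyRange low (high + 1) 1) == -1) = true
                   then low + 1 + (high - low)
                   else pvScanA pre y (PySem.List.pyRange low (high + 1) 1)) =
                  low + 1 + (len1 : Int) := by
          rw [hscan0, hscan]
          by_cases hemp : (pvSplitGr y rest).2 = []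
          · have h3 := hlens
            rw [hemp] at h3
            simp at h3
            rw [if_pos hemp]
            norm_num
            omega
          · rw [if_neg hemp]
            have hne : ((low + 1 + (len1 : Int)) == -1) = false := by
              simp; omega
            rw [hne]
            simp
        -- the two sub-segments
        have hdropL : rest = (pre.drop (low.toNat + 1)).take ((high - low).toNat) := by
          rw [hrest]
          unfold pvSeg
          rw [show (low + 1 : Int).toNat = low.toNat + 1 by omega,
              show (high + 1 - (low + 1)).toNat = (high - low).toNat by omega]
        have hseg1 : pvSeg pre (low + 1) (low + 1 + (len1 : Int) - 1) = (pvSplitGr y rest).1 := by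
          unfold pvSeg
          have hK : (low + 1 + (len1 : Int) - 1 + 1 - (low + 1)).toNat = len1 := by omega
          have hN : (low + 1 : Int).toNat = low.toNat + 1 := by omega
          rw [hK, hN]
          have h4 : rest.take len1 = (pvSplitGr y rest).1 := by
            conv_lhs => rw [← pvSplitGr_append y rest]
            exact List.take_left' (by rw [hlen1])
          rw [← h4, hdropL, List.take_take]
          congr 1
          omega
        have hseg2 : pvSeg pre (low + 1 + (len1 : Int)) high = (pvSplitGr y rest).2 := by
          unfold pvSeg
          have h6 : rest.drop len1 = (pvSplitGr y rest).2 := by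
            conv_lhs => rw [← pvSplitGr_append y rest]
            exact List.drop_left' (by rw [hlen1])
          rw [← h6, hdropL, List.drop_take, List.drop_drop]
          rw [show ((low : Int) + 1 + (len1 : Int)).toNat = low.toNat + 1 + len1 by omega,
              show (high + 1 - (low + 1 + (len1 : Int))).toNat = (high - low).toNat - len1 by omega]
        -- the two recursive calls
        have hileft := ih pre (d + 1) (low + 1) (low + 1 + (len1 : Int) - 1)
          (by omega) (by omega) (by omega) (by omega)
        have hiright := ih pre (d + 1) (low + 1 + (len1 : Int)) high
          (by omega) (by omega) (by omega) (by omega)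
        -- assemble
        simp only [pvBuildA, gt_iff_lt]
        rw [if_neg (by omega : ¬ high < low)]
        rw [show (low == high) = false by simp [heq]]
        simp only [Bool.false_eq_true, if_false]
        rw [hget, hr, hileft]
        rw [show low + 1 + (len1 : Int) - 1 + 1 = low + 1 + (len1 : Int) by ring]
        rw [hiright, hseg1, hseg2, hseg]
        simp [pvSpecTree]

def pvTk : Option Int → List Int → List Int
  | none, l => l
  | some b, l => (pvSplitGr b l).1

-- B's build = pvSpecTree of the bound-limited prefix of the remaining suffix
theorem pvBuildB_spec :
    ∀ (fuel : Nat) (pre : List Int) (bound : Option Int) (d idx : Int),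
    0 ≤ idx → idx ≤ (pre.length : Int) → ((pre.length : Int) - idx).toNat < fuel →
    pvBuildB pre pre.length fuel bound d idx =
      (pvSpecTree d (pvTk bound (pre.drop idx.toNat)),
       idx + ((pvTk bound (pre.drop idx.toNat)).length : Int)) := by
  intro fuel
  induction fuel with
  | zero => intro pre bound d idx _ _ hf; omega
  | succ f ih =>
    intro pre bound d idx hi hile hf
    by_cases hend : idx = (pre.length : Int)
    · have hdrop : pre.drop idx.toNat = [] := by
        apply List.drop_eq_nil_of_le; omega
      have htk : pvTk bound (pre.drop idx.toNat) = [] := by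
        rw [hdrop]; cases bound <;> rfl
      rw [htk]
      simp [pvBuildB, hend, pvSpecTree]
    · have hlt : idx.toNat < pre.length := by omega
      have hget : (PySem.List.pyGet? pre idx).getD 0 = pre[idx.toNat] := by
        rw [PySem.List.pyGet?_eq_some_getElem pre hi (by omega)]
        rfl
      set y := pre[idx.toNat] with hy
      have hdrop : pre.drop idx.toNat = y :: pre.drop (idx.toNat + 1) := by
        rw [List.drop_eq_getElem_cons hlt]
      set rest := pre.drop (idx.toNat + 1) with hrestB
      have hrlen : rest.length = pre.length - (idx.toNat + 1) := by
        rw [hrestB]; simp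
      have hidx1 : (idx + 1).toNat = idx.toNat + 1 := by omega
      have hne : (idx == (pre.length : Int)) = false := by simp [hend]
      -- does the bound cut here?
      by_cases hcut : (match bound with | some b => decide (b < y) | none => false) = true
      · rcases bound with _ | b
        · simp at hcut
        · simp only [decide_eq_true_eq] at hcut
          have htk : pvTk (some b) (pre.drop idx.toNat) = [] := by
            rw [hdrop]; simp [pvTk, pvSplitGr, hcut]
          rw [htk]
          simp only [pvBuildB, hne, Bool.false_eq_true, if_false, hget]
          rw [if_pos (by simp [hcut])]
          simp [pvSpecTree]
      · -- the root is taken; left with bound y, right with the old bound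
        have hileft := ih pre (some y) (d + 1) (idx + 1) (by omega) (by omega) (by omega)
        rw [hidx1, ← hrestB] at hileft
        simp only [pvTk] at hileft
        set len1 := ((pvSplitGr y rest).1).length with hlen1B
        have hlens := pvSplitGr_lens y rest
        have hiright := ih pre bound (d + 1) (idx + 1 + (len1 : Int)) (by omega) (by omega) (by omega)
        have hdrop2 : pre.drop (idx + 1 + (len1 : Int)).toNat = (pvSplitGr y rest).2 := by
          have h6 : rest.drop len1 = (pvSplitGr y rest).2 := by
            conv_lhs => rw [← pvSplitGr_append y rest]
            exact List.drop_left' (by rw [hlen1B])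
          rw [← h6, hrestB, List.drop_drop]
          congr 1
          omega
        rw [hdrop2] at hiright
        -- unfold one step of the program
        simp only [pvBuildB, hne, Bool.false_eq_true, if_false, hget]
        rw [if_neg (by simpa using hcut)]
        rw [hileft, hiright]
        rw [hdrop]
        rcases bound with _ | b
        · -- no bound: the whole suffix is consumed
          simp only [pvTk, pvSpecTree, Prod.mk.injEq, List.length_cons]
          refine ⟨by trivial, ?_⟩
          push_cast
          omega
        · -- bound b with y ≤ b
          have hyb : y ≤ b := by
            simp only [decide_eq_true_eq] at hcut
            omega
          have hQ : pvTk (some b) (y :: rest) = y :: (pvSplitGr b rest).1 := by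
            simp [pvTk, pvSplitGr, not_lt.mpr hyb]
          rw [hQ]
          simp only [pvSpecTree]
          rw [pvSplitGr_nest1 y b hyb rest, pvSplitGr_nest2 y b hyb rest]
          simp only [Prod.mk.injEq, List.length_cons]
          refine ⟨by trivial, ?_⟩
          have h8 := congrArg List.length (pvSplitGr_nest3 y b hyb rest)
          simp at h8
          simp only [pvTk]
          push_cast
          omega

-- node labels read off a tree
def pvKeyOf : PvTree → Int
  | .nil => 0
  | .node k _ _ _ => k

def pvLevelOf : PvTree → Int
  | .nil => 0
  | .node _ lv _ _ => lv

theorem pvChildren_nilfree (t : PvTree) : ∀ u ∈ pvChildren t, u ≠ PvTree.nil := by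
  cases t with
  | nil => simp [pvChildren]
  | node k lv l r =>
    intro u hu
    simp only [pvChildren, List.mem_append] at hu
    rcases hu with hu | hu
    · by_cases hl : l ≠ PvTree.nil
      · simp [hl] at hu; exact hu ▸ hl
      · simp [hl] at hu
    · by_cases hr : r ≠ PvTree.nil
      · simp [hr] at hu; exact hu ▸ hr
      · simp [hr] at hu

theorem pvSize_children (t : PvTree) (h : t ≠ PvTree.nil) :
    ((pvChildren t).map pvSize).sum + 1 = pvSize t := by
  cases t with
  | nil => exact absurd rfl h
  | node k lv l r =>
    rcases l with _ | ⟨lk, ll, la, lb⟩ <;> rcases r with _ | ⟨rk, rl, ra, rb⟩ <;>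
      simp [pvChildren, pvSize] <;> omega

theorem pvLevelStep_eq (cur : List PvTree) (h : ∀ t ∈ cur, t ≠ PvTree.nil) :
    pvLevelStep cur = (cur.map pvKeyOf, cur.map pvLevelOf, cur.flatMap pvChildren) := by
  induction cur with
  | nil => rfl
  | cons t rest ih =>
    have ht : t ≠ PvTree.nil := h t (by simp)
    rcases t with _ | ⟨k, lv, l, r⟩
    · exact absurd rfl ht
    · have ih' := ih (fun u hu => h u (by simp [hu]))
      rcases l with _ | ⟨lk, ll, la, lb⟩ <;> rcases r with _ | ⟨rk, rl, ra, rb⟩ <;>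
        simp [pvLevelStep, ih', pvChildren, pvKeyOf, pvLevelOf]

-- the queue BFS equals the level-by-level sweep: rest is what is left of the current
-- level, pending the already-discovered part of the next level
theorem pvBfs_lev :
    ∀ (s : Nat) (rest pending : List PvTree),
    ((rest ++ pending).map pvSize).sum = s →
    (∀ t ∈ rest, t ≠ PvTree.nil) → (∀ t ∈ pending, t ≠ PvTree.nil) →
    pvBfsA (rest ++ pending) =
      (rest.map pvKeyOf ++ (pvLevB (pending ++ rest.flatMap pvChildren)).1,
       rest.map pvLevelOf ++ (pvLevB (pending ++ rest.flatMap pvChildren)).2) := by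
  intro s
  induction s using Nat.strong_induction_on with
  | _ s ihs =>
  intro rest pending hs hr hp
  cases rest with
  | nil =>
    cases pending with
    | nil => simp [pvBfsA, pvLevB]
    | cons u us =>
      have hu : u ≠ PvTree.nil := hp u (by simp)
      rcases u with _ | ⟨k, lv, l, r⟩
      · exact absurd rfl hu
      · have hch := pvSize_children (PvTree.node k lv l r) (by intro hc; cases hc)
        have hsum : ((us ++ pvChildren (PvTree.node k lv l r)).map pvSize).sum < s := by
          simp only [List.map_append, List.sum_append] at *
          simp only [List.map_cons, List.sum_cons] at hs
          omega
        have hrec := ihs _ hsum us (pvChildren (PvTree.node k lv l r)) rfl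
          (fun v hv => hp v (by simp [hv])) (pvChildren_nilfree _)
        have hstep := pvLevelStep_eq (PvTree.node k lv l r :: us) hp
        rw [List.nil_append]
        rw [show pvBfsA (PvTree.node k lv l r :: us) =
              (k :: (pvBfsA (us ++ pvChildren (PvTree.node k lv l r))).1,
               lv :: (pvBfsA (us ++ pvChildren (PvTree.node k lv l r))).2) by
            rw [pvBfsA]]
        rw [hrec]
        simp only [List.map_nil, List.nil_append, List.flatMap_nil, List.append_nil]
        rw [show pvLevB (PvTree.node k lv l r :: us) =
              ((pvLevelStep (PvTree.node k lv l r :: us)).1 ++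
                 (pvLevB ((pvLevelStep (PvTree.node k lv l r :: us)).2.2)).1,
               (pvLevelStep (PvTree.node k lv l r :: us)).2.1 ++
                 (pvLevB ((pvLevelStep (PvTree.node k lv l r :: us)).2.2)).2) by
            rw [pvLevB]]
        rw [hstep]
        simp [pvKeyOf, pvLevelOf, List.flatMap_cons]
  | cons t rest' =>
    have ht : t ≠ PvTree.nil := hr t (by simp)
    rcases t with _ | ⟨k, lv, l, r⟩
    · exact absurd rfl ht
    · have hch := pvSize_children (PvTree.node k lv l r) (by intro hc; cases hc)
      have hsum : ((rest' ++ (pending ++ pvChildren (PvTree.node k lv l r))).map pvSize).sum < s := by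
        simp only [List.map_append, List.sum_append] at *
        simp only [List.map_cons, List.sum_cons] at hs
        omega
      have hrec := ihs _ hsum rest' (pending ++ pvChildren (PvTree.node k lv l r)) rfl
        (fun v hv => hr v (by simp [hv]))
        (by intro v hv
            rcases List.mem_append.mp hv with hv | hv
            · exact hp v hv
            · exact pvChildren_nilfree _ v hv)
      rw [List.cons_append]
      rw [show pvBfsA (PvTree.node k lv l r :: (rest' ++ pending)) =
            (k :: (pvBfsA ((rest' ++ pending) ++ pvChildren (PvTree.node k lv l r))).1,
             lv :: (pvBfsA ((rest' ++ pending) ++ pvChildren (PvTree.node k lv l r))).2) by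
          rw [pvBfsA]]
      rw [List.append_assoc, hrec]
      simp [pvKeyOf, pvLevelOf, List.append_assoc, List.flatMap_cons]

-- ===== VERDICT (by name: the statement is the Claim_ definition above) =====
theorem get_level_order_keys_and_levels_spec : Claim_equal_get_level_order_keys_and_levels := by
  unfold Claim_equal_get_level_order_keys_and_levels
  intro pre _ hpre
  unfold Pre_get_level_order_keys_and_levels at hpre
  unfold Spec_get_level_order_keys_and_levels
  cases pre with
  | nil => exact absurd rfl hpre
  | cons x xs =>
    have hA := pvBuildA_spec ((x :: xs).length + 1) (x :: xs) 0 0 (((x :: xs).length : Int) - 1)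
      (le_refl 0) (by simp; positivity) (by omega) (by omega)
    have hB := pvBuildB_spec ((x :: xs).length + 1) (x :: xs) none 0 0
      (le_refl 0) (by simp; positivity) (by omega)
    have hsegfull : pvSeg (x :: xs) 0 (((x :: xs).length : Int) - 1) = x :: xs := by
      unfold pvSeg
      rw [show ((((x :: xs).length : Int)) - 1 + 1 - 0).toNat = (x :: xs).length by omega]
      simp
    rw [hsegfull] at hA
    have hdrop0 : (x :: xs).drop ((0 : Int)).toNat = x :: xs := by simp
    rw [hdrop0] at hB
    simp only [pvTk] at hB
    have hspec : pvSpecTree 0 (x :: xs) =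
        PvTree.node x 0 (pvSpecTree 1 (pvSplitGr x xs).1) (pvSpecTree 1 (pvSplitGr x xs).2) := by
      simp [pvSpecTree]
    have hbfs := pvBfs_lev (([] ++ [pvSpecTree 0 (x :: xs)]).map pvSize).sum
      [] [pvSpecTree 0 (x :: xs)] rfl (by simp)
      (by intro v hv
          simp at hv
          subst hv
          rw [hspec]
          intro hc
          cases hc)
    simp only [List.nil_append, List.map_nil, List.flatMap_nil, List.append_nil] at hbfs
    simp only [get_level_order_keys_and_levels, get_level_order_keys_and_levels_alt]
    rw [hA, hB, hspec]
    simpa [hspec] using hbfs
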